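-- pv_equiv track=rewrite | github.com/offbynull/xplore-path | src/xplore_path/matchers/acronym_matcher.py | _camelcase_extract
-- ===== SOURCE A (Python) =====
-- def _camelcase_extract(val: str) -> str | None:
--     val_it = iter(val)
--     ret = ''
--     current_word = next(val_it, None)
--     if current_word is None or not (current_word.isalnum() and current_word.islower()):
--         return None
--     for v in val_it:
--         if v.isupper():
--             if current_word == '' or not current_word.isalnum():
--                 return None
--             ret += current_word[0]
--             current_word = v
--         elif v.isalnum():
--             current_word += v
--         else:
--             return None
--     if current_word and current_word.isalnum():
--         ret += current_word[0]
--     return ret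
-- ===== SOURCE B (Python) =====
-- def _camelcase_extract(val):
--     if not val or not (val[0].isalnum() and val[0].islower()):
--         return None
--     rest = val[1:]
--     if any(not (c.isupper() or c.isalnum()) for c in rest):
--         return None
--     return val[0] + ''.join(c for c in rest if c.isupper())
-- ===== Notes on version B (the rewrite author's own statement) =====
-- stated objective: simpler
-- what changed: Replaces the word-accumulation state machine (building current_word and appending its first char at each boundary) with a single validation pass plus an uppercase filter: the acronym is val[0] followed by every uppercase char of val[1:].
import Mathlib
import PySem

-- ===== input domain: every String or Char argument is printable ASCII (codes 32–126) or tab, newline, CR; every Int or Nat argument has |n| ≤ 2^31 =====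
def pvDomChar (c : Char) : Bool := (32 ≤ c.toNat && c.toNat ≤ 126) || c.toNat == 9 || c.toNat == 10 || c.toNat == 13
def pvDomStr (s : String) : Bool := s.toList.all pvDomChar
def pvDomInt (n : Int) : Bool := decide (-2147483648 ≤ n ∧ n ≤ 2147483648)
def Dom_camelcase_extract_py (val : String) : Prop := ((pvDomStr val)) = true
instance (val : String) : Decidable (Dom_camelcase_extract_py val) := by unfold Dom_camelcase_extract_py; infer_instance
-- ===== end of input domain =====

-- B replaces A's word-accumulation state machine with a validation pass plus an
-- uppercase filter (acronym = val[0] + uppercase chars of val[1:]); objective: simpler.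


-- ===== PORT A =====
-- the for-loop over the rest of the iterator, state = (ret, current_word); none = early 'return None'
def pvALoop : List Char → List Char → List Char → Option (List Char × List Char)
  | [], ret, cw => some (ret, cw)
  | v :: rest, ret, cw =>
    if PySem.Chars.isupper v then
      if cw = [] ∨ ¬ cw.all PySem.Chars.isalnum then none
      else pvALoop rest (ret ++ cw.take 1) [v]
    else if PySem.Chars.isalnum v then pvALoop rest ret (cw ++ [v])
    else none

-- the code after the loop: early None propagated; else the final 'if current_word and …'
def pvAFinish : Option (List Char × List Char) → Option String
  | none => none
  | some (ret, cw) =>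
    if cw ≠ [] ∧ cw.all PySem.Chars.isalnum
    then some (String.ofList (ret ++ cw.take 1))
    else some (String.ofList ret)

def camelcase_extract_py (val : String) : Option String :=
  match val.toList with
  | [] => none                                  -- next(val_it, None) is None
  | c :: rest =>
    if ¬ (PySem.Chars.isalnum c ∧ PySem.Chars.islower c) then none
    else pvAFinish (pvALoop rest [] [c])

-- ===== PORT B =====
def camelcase_extract_py_alt (val : String) : Option String :=
  match val.toList with
  | [] => none
  | c :: rest =>
    if ¬ (PySem.Chars.isalnum c && PySem.Chars.islower c) then none
    else if rest.any (fun v => ¬ (PySem.Chars.isupper v || PySem.Chars.isalnum v)) then none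
    else some (String.ofList (c :: rest.filter PySem.Chars.isupper))

-- ===== PRECONDITION & SPEC =====
def Spec_camelcase_extract_py (val : String) (out : Option String) : Prop := out = camelcase_extract_py_alt val
instance (val : String) (out : Option String) : Decidable (Spec_camelcase_extract_py val out) := by unfold Spec_camelcase_extract_py; infer_instance

-- ===== CLAIM (what is proved, stated in full; the proofs are below) =====
def Claim_equal_camelcase_extract_py : Prop := ∀ (val : String), Dom_camelcase_extract_py val → Spec_camelcase_extract_py val (camelcase_extract_py val)

-- ===== LEMMAS AND PROOFS =====

theorem pv_upper_alnum {c : Char} (h : PySem.Chars.isupper c = true) :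
    PySem.Chars.isalnum c = true := by
  simp [PySem.Chars.isupper, PySem.Chars.isalnum, PySem.Chars.isalpha] at *
  tauto

-- the loop invariant: with current_word nonempty and all-alnum, A's loop+final
-- computes exactly B's "validate then filter uppercase" value
theorem pvALoop_char :
    ∀ (rest ret : List Char) (h : Char) (t : List Char), (h :: t).all PySem.Chars.isalnum = true →
    pvAFinish (pvALoop rest ret (h :: t)) =
    (if rest.any (fun v => ¬ (PySem.Chars.isupper v || PySem.Chars.isalnum v)) then none
     else some (String.ofList (ret ++ h :: rest.filter PySem.Chars.isupper))) := by
  intro rest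
  induction rest with
  | nil => intro ret h t halnum; simp [pvALoop, pvAFinish, halnum]
  | cons v rest ih =>
    intro ret h t halnum
    by_cases hu : PySem.Chars.isupper v = true
    · have hva := pv_upper_alnum hu
      simp only [pvALoop, hu, if_true]
      rw [if_neg (by simp [halnum])]
      have ht1 : List.take 1 (h :: t) = [h] := rfl
      rw [ht1, ih (ret ++ [h]) v [] (by simp [hva])]
      simp [hu, hva]
    · by_cases ha : PySem.Chars.isalnum v = true
      · simp only [pvALoop, hu, ha, if_false, if_true, Bool.false_eq_true]
        have hall : (h :: (t ++ [v])).all PySem.Chars.isalnum = true := by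
          simp at halnum ⊢; exact ⟨halnum.1, fun c hc => halnum.2 c hc, ha⟩
        rw [List.cons_append, ih ret h (t ++ [v]) hall]
        simp [hu, ha]
      · simp [pvALoop, pvAFinish, hu, ha]

-- ===== VERDICT (by name: the statement is the Claim_ definition above) =====
theorem camelcase_extract_py_spec : Claim_equal_camelcase_extract_py := by
  intro val _
  unfold Spec_camelcase_extract_py camelcase_extract_py camelcase_extract_py_alt
  rcases hl : val.toList with _ | ⟨c, rest⟩ <;> dsimp only
  by_cases hc : PySem.Chars.isalnum c = true ∧ PySem.Chars.islower c = true
  · rw [if_neg (by simp [hc.1, hc.2]), if_neg (by simp [hc.1, hc.2])]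
    exact pvALoop_char rest [] c [] (by simp [hc.1])
  · rw [if_pos (by tauto), if_pos (by by_contra hcon; simp at hcon; exact hc hcon)]
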